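-- pv_equiv track=rewrite | github.com/sanmasanba/atcoder_codes | ABC/200/244/ABC244_D.py | solve
-- ===== SOURCE A (Python) =====
-- def solve(T):
--     ope = 0
--     for i in range(3):
--         for j in range(3-i-1):
--             if T[j] > T[j+1]:
--                 ope += 1
--                 T[j+1], T[j] = T[j], T[j+1]
--     return ope
-- ===== SOURCE B (Python) =====
-- def solve(T):
--     # inversion count of the first three elements = bubble-sort swap count
--     ope = 0
--     for i in range(3):
--         for j in range(i + 1, 3):
--             if T[i] > T[j]:
--                 ope += 1
--     T[:3] = sorted(T[:3])  # reproduce A's in-place sorting side effect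
--     return ope
-- ===== Notes on version B (the rewrite author's own statement) =====
-- stated objective: alternative
-- what changed: Counts inversions over pairs i<j of the first three elements directly instead of simulating bubble-sort swaps, then sorts the prefix once to keep the mutation.
import Mathlib
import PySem

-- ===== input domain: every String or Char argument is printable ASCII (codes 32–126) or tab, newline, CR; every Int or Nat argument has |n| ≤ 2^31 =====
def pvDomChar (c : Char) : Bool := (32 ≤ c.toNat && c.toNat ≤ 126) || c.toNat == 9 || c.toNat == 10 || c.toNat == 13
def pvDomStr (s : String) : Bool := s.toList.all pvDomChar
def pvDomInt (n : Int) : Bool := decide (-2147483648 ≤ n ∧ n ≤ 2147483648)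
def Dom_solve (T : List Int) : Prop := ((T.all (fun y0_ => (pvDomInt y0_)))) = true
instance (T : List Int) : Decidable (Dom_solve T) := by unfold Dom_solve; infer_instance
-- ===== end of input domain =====

-- B changes the algorithm (direct pair inversion count instead of swap simulation);
-- equivalence proved is about the return value (both Pythons also sort T's first
-- three elements in place, B via T[:3] = sorted(T[:3])).

-- ===== PORT A =====
-- one bubble pass step at position j: compare T[j], T[j+1], swap and count
def solveStep (st : List Int × Int) (j : Nat) : List Int × Int :=
  let T := st.1
  let a := T.getD j 0
  let b := T.getD (j + 1) 0
  if a > b then ((T.set (j + 1) a).set j b, st.2 + 1) else st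

def solve (T : List Int) : Int :=
  ((List.range 3).foldl (fun st i => (List.range (3 - i - 1)).foldl solveStep st) (T, 0)).2

-- ===== PORT B =====
def solve_alt (T : List Int) : Int :=
  (List.range 3).foldl (fun ope i =>
    (List.range' (i + 1) (3 - (i + 1))).foldl (fun ope j =>
      if T.getD i 0 > T.getD j 0 then ope + 1 else ope) ope) 0

-- ===== PRECONDITION & SPEC =====
-- A indexes T[0..2] unconditionally, raising IndexError on lists shorter than 3.
def Pre_solve (T : List Int) : Prop := 3 ≤ T.length
instance (T : List Int) : Decidable (Pre_solve T) := by unfold Pre_solve; infer_instance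
def pvWitness_solve : List Int := [3, 1, 2]

def Spec_solve (T : List Int) (out : Int) : Prop := out = solve_alt T
instance (T : List Int) (out : Int) : Decidable (Spec_solve T out) := by unfold Spec_solve; infer_instance

-- ===== CLAIM (what is proved, stated in full; the proofs are below) =====
def Claim_equal_solve : Prop := ∀ (T : List Int), Dom_solve T → Pre_solve T → Spec_solve T (solve T)

-- ===== LEMMAS AND PROOFS =====

-- ===== VERDICT (by name: the statement is the Claim_ definition above) =====
theorem solve_spec : Claim_equal_solve := by
  intro T _ hpre
  match T, hpre with
  | a :: b :: c :: rest, _ =>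
    unfold Spec_solve solve solve_alt solveStep
    simp only [List.range, List.range.loop, List.range', List.foldl, List.getD,
      List.getElem?_cons_zero, List.getElem?_cons_succ, Option.getD_some]
    split_ifs <;> simp_all <;> omega
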